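-- pv_equiv track=rewrite | github.com/elikrok/cmmc_tool | enhanced_features/vendor_manager.py | check_access_control
-- ===== SOURCE A (Python) =====
-- from typing import Dict, List, Optional, Tuple
--
-- def check_access_control(config_content: str) -> Dict:
--     """Check access control for IOS."""
--     lines = config_content.lower().split('\n')
--
--     # Check for enable secret
--     enable_secret = any(line.strip().startswith('enable secret') for line in lines)
--
--     # Check for SSH-only transport
--     ssh_only = False
--     in_vty = False
--     telnet_found = False
--
--     for line in lines:
--         line = line.strip()
--         if line.startswith('line vty'):
--             in_vty = True
--             continue
--         if in_vty and line.startswith('line '):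
--             in_vty = False
--         if in_vty:
--             if 'transport input ssh' in line and 'telnet' not in line:
--                 ssh_only = True
--             if 'transport input telnet' in line:
--                 telnet_found = True
--
--     return {
--         'enable_secret_present': enable_secret,
--         'ssh_only': ssh_only and not telnet_found,
--         'no_telnet': not telnet_found,
--         'passed': enable_secret and ssh_only and not telnet_found
--     }
-- ===== SOURCE B (Python) =====
-- def check_access_control(config_content: str):
--     """Check access control for IOS (grouped-sections re-implementation)."""
--     lines = [raw.strip() for raw in config_content.lower().split('\n')]
--
--     # Group into (header, body) sections; lines before the first header are dropped.
--     sections = []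
--     for l in lines:
--         if l.startswith('line '):
--             sections.append((l, []))
--         elif sections:
--             sections[-1][1].append(l)
--
--     vty_body = [b for h, body in sections if h.startswith('line vty') for b in body]
--
--     enable_secret = any(l.startswith('enable secret') for l in lines)
--     ssh_only = any('transport input ssh' in b and 'telnet' not in b for b in vty_body)
--     telnet_found = any('transport input telnet' in b for b in vty_body)
--
--     return {
--         'enable_secret_present': enable_secret,
--         'ssh_only': ssh_only and not telnet_found,
--         'no_telnet': not telnet_found,
--         'passed': enable_secret and ssh_only and not telnet_found
--     }
-- ===== Notes on version B (the rewrite author's own statement) =====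
-- stated objective: alternative
-- what changed: Replaces the stateful in-vty-toggling loop with a group-then-scan decomposition: lines are stripped once, grouped into (header, body) sections in one pass, the bodies of the vty sections are flattened into one list, and the ssh/telnet flags are each derived by an any() scan over that list.
import Mathlib
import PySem

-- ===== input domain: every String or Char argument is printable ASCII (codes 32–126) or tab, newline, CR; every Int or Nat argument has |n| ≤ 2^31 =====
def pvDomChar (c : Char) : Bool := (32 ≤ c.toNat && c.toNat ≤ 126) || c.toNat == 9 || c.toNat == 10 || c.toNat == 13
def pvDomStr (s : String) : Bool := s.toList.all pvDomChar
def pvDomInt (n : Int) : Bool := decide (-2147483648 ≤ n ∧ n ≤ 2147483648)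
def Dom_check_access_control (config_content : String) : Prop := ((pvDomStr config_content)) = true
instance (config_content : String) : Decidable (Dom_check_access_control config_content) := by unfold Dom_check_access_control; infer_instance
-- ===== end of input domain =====

-- B replaces A's stateful in_vty-toggling loop by a group-into-sections pass plus two any-scans
-- over the collected vty body lines (alternative decomposition; return value only).

-- ===== PORT A =====
def check_access_control (config_content : String) : List (String × Bool) :=
  let lines := (PySem.Str.split? (PySem.Str.lower config_content) "\n").getD []
  let enable_secret := lines.any (fun line => PySem.Str.startswith (PySem.Str.strip line) "enable secret")
  let st := lines.foldl (fun (st : Bool × Bool × Bool) line =>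
      let l := PySem.Str.strip line
      if PySem.Str.startswith l "line vty" then
        (st.1, true, st.2.2)
      else
        let in_vty := if st.2.1 && PySem.Str.startswith l "line " then false else st.2.1
        if in_vty then
          (st.1 || (PySem.Str.isIn "transport input ssh" l && !(PySem.Str.isIn "telnet" l)),
           in_vty,
           st.2.2 || PySem.Str.isIn "transport input telnet" l)
        else (st.1, in_vty, st.2.2))
    (false, false, false)
  [("enable_secret_present", enable_secret),
   ("ssh_only", st.1 && !st.2.2),
   ("no_telnet", !st.2.2),
   ("passed", enable_secret && st.1 && !st.2.2)]

-- ===== PORT B =====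
-- sections[-1][1].append(l): append l to the body of the last section
def pvAppendLast : List (String × List String) → String → List (String × List String)
  | [], _ => []
  | [(h, b)], l => [(h, b ++ [l])]
  | s :: t :: rest, l => s :: pvAppendLast (t :: rest) l

def check_access_control_alt (config_content : String) : List (String × Bool) :=
  let lines := ((PySem.Str.split? (PySem.Str.lower config_content) "\n").getD []).map PySem.Str.strip
  let sections := lines.foldl (fun (secs : List (String × List String)) l =>
      if PySem.Str.startswith l "line " then secs ++ [(l, [])]
      else if secs.isEmpty then secs
      else pvAppendLast secs l) []
  let vty_body := (sections.filter (fun s => PySem.Str.startswith s.1 "line vty")).flatMap (fun s => s.2)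
  let enable_secret := lines.any (fun l => PySem.Str.startswith l "enable secret")
  let ssh_only := vty_body.any (fun b => PySem.Str.isIn "transport input ssh" b && !(PySem.Str.isIn "telnet" b))
  let telnet_found := vty_body.any (fun b => PySem.Str.isIn "transport input telnet" b)
  [("enable_secret_present", enable_secret),
   ("ssh_only", ssh_only && !telnet_found),
   ("no_telnet", !telnet_found),
   ("passed", enable_secret && ssh_only && !telnet_found)]

-- ===== PRECONDITION & SPEC =====
def Spec_check_access_control (config_content : String) (out : List (String × Bool)) : Prop := out = check_access_control_alt config_content
instance (config_content : String) (out : List (String × Bool)) : Decidable (Spec_check_access_control config_content out) := by unfold Spec_check_access_control; infer_instance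

-- ===== CLAIM (what is proved, stated in full; the proofs are below) =====
def Claim_equal_check_access_control : Prop := ∀ (config_content : String), Dom_check_access_control config_content → Spec_check_access_control config_content (check_access_control config_content)

-- ===== LEMMAS AND PROOFS =====

def pvVtyHdr (l : String) : Bool := PySem.Str.startswith l "line vty"
def pvHdr (l : String) : Bool := PySem.Str.startswith l "line "
def pvP (l : String) : Bool := PySem.Str.isIn "transport input ssh" l && !(PySem.Str.isIn "telnet" l)
def pvQ (l : String) : Bool := PySem.Str.isIn "transport input telnet" l

-- A's loop step, on an already-stripped line
def pvStepA (st : Bool × Bool × Bool) (l : String) : Bool × Bool × Bool :=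
  if pvVtyHdr l then
    (st.1, true, st.2.2)
  else
    let in_vty := if st.2.1 && pvHdr l then false else st.2.1
    if in_vty then (st.1 || pvP l, in_vty, st.2.2 || pvQ l)
    else (st.1, in_vty, st.2.2)

-- B's grouping step
def pvStepB (secs : List (String × List String)) (l : String) : List (String × List String) :=
  if pvHdr l then secs ++ [(l, [])]
  else if secs.isEmpty then secs
  else pvAppendLast secs l

-- the vty body lines contributed by a list of stripped lines, entered with in_vty = inv
def pvBody : List String → Bool → List String
  | [], _ => []
  | l :: ls, inv =>
    if pvVtyHdr l then pvBody ls true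
    else if pvHdr l then pvBody ls false
    else (if inv then [l] else []) ++ pvBody ls inv

-- final in_vty flag
def pvFinVty : List String → Bool → Bool
  | [], inv => inv
  | l :: ls, inv =>
    if pvVtyHdr l then pvFinVty ls true
    else if pvHdr l then pvFinVty ls false
    else pvFinVty ls inv

def pvLastVty (secs : List (String × List String)) : Bool :=
  match secs.getLast? with
  | some s => pvVtyHdr s.1
  | none => false

def pvVtyBody (secs : List (String × List String)) : List String :=
  (secs.filter (fun s => pvVtyHdr s.1)).flatMap (fun s => s.2)

lemma pvHdr_of_vty (l : String) (h : pvVtyHdr l = true) : pvHdr l = true := by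
  unfold pvVtyHdr at h
  unfold pvHdr
  simp only [PySem.Str.startswith_eq] at h ⊢
  rw [PySem.Chars.startswith_iff] at h ⊢
  exact (show ("line ").toList <+: ("line vty").toList by decide).trans h

lemma foldA_eq (ls : List String) (ssh inv tel : Bool) :
    ls.foldl pvStepA (ssh, inv, tel) =
      (ssh || (pvBody ls inv).any pvP, pvFinVty ls inv, tel || (pvBody ls inv).any pvQ) := by
  induction ls generalizing ssh inv tel with
  | nil => simp [pvBody, pvFinVty]
  | cons l ls ih =>
    by_cases hv : pvVtyHdr l = true
    · simp [List.foldl_cons, pvStepA, hv, pvBody, pvFinVty, ih]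
    · by_cases hl : pvHdr l = true
      · cases inv <;>
          simp [List.foldl_cons, pvStepA, hv, hl, pvBody, pvFinVty, ih]
      · cases inv <;>
          simp [List.foldl_cons, pvStepA, hv, hl, pvBody, pvFinVty, ih, Bool.or_assoc]

lemma appendLast_ne_nil (secs : List (String × List String)) (l : String) (h : secs ≠ []) :
    pvAppendLast secs l ≠ [] := by
  cases secs with
  | nil => simp at h
  | cons s rest =>
    cases rest with
    | nil => cases s; simp [pvAppendLast]
    | cons t rest' => simp [pvAppendLast]

lemma getLast?_appendLast (secs : List (String × List String)) (l : String) :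
    (pvAppendLast secs l).getLast? = secs.getLast?.map (fun s => (s.1, s.2 ++ [l])) := by
  induction secs with
  | nil => simp [pvAppendLast]
  | cons s rest ih =>
    cases rest with
    | nil => cases s; simp [pvAppendLast]
    | cons t rest' =>
      have hne : pvAppendLast (t :: rest') l ≠ [] := appendLast_ne_nil _ _ (by simp)
      obtain ⟨x, xs, hx⟩ := List.exists_cons_of_ne_nil hne
      rw [show pvAppendLast (s :: t :: rest') l = s :: pvAppendLast (t :: rest') l from by
            cases s; cases t; rfl,
          hx, List.getLast?_cons_cons, ← hx, ih, List.getLast?_cons_cons]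

lemma lastVty_appendLast (secs : List (String × List String)) (l : String) :
    pvLastVty (pvAppendLast secs l) = pvLastVty secs := by
  unfold pvLastVty
  rw [getLast?_appendLast]
  cases secs.getLast? <;> simp

lemma vtyBody_appendLast (secs : List (String × List String)) (l : String) (h : secs ≠ []) :
    pvVtyBody (pvAppendLast secs l) =
      pvVtyBody secs ++ (if pvLastVty secs then [l] else []) := by
  induction secs with
  | nil => simp at h
  | cons s rest ih =>
    cases rest with
    | nil =>
      cases s with
      | mk hd bd =>
        by_cases hv : pvVtyHdr hd = true <;>
          simp [pvAppendLast, pvVtyBody, pvLastVty, hv]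
    | cons t rest' =>
      have ih' := ih (by simp)
      have hlast : pvLastVty (t :: rest') = pvLastVty (s :: t :: rest') := by
        simp [pvLastVty, List.getLast?_cons_cons]
      by_cases hv : pvVtyHdr s.1 = true <;>
        simp [pvAppendLast, pvVtyBody, hv, hlast] at ih' ⊢ <;>
        rw [ih']

lemma foldB_eq (ls : List String) (secs : List (String × List String)) :
    pvVtyBody (ls.foldl pvStepB secs) = pvVtyBody secs ++ pvBody ls (pvLastVty secs) := by
  induction ls generalizing secs with
  | nil => simp [pvBody]
  | cons l ls ih =>
    by_cases hl : pvHdr l = true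
    · have hstep : pvStepB secs l = secs ++ [(l, [])] := by simp [pvStepB, hl]
      have hlast : pvLastVty (secs ++ [(l, [])]) = pvVtyHdr l := by
        simp [pvLastVty]
      have hbody : pvVtyBody (secs ++ [(l, [])]) = pvVtyBody secs := by
        by_cases hv : pvVtyHdr l = true <;>
          simp [pvVtyBody, List.filter_append, hv]
      by_cases hv : pvVtyHdr l = true <;>
        simp [List.foldl_cons, hstep, ih, hlast, hbody, pvBody, hv, hl]
    · have hv : ¬ pvVtyHdr l = true := fun hv => hl (pvHdr_of_vty l hv)
      cases hsecs : secs with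
      | nil =>
        have hstep : pvStepB [] l = [] := by simp [pvStepB, hl]
        rw [List.foldl_cons, hstep, ih]
        simp [pvVtyBody, pvLastVty, pvBody, hv, hl]
      | cons s rest =>
        have hne : (s :: rest) ≠ ([] : List (String × List String)) := by simp
        have hstep : pvStepB (s :: rest) l = pvAppendLast (s :: rest) l := by
          simp [pvStepB, hl]
        rw [List.foldl_cons, hstep, ih, lastVty_appendLast _ _,
            vtyBody_appendLast _ _ hne]
        by_cases hiv : pvLastVty (s :: rest) = true <;>
          simp [pvBody, hv, hl, hiv, List.append_assoc]

-- ===== VERDICT (by name: the statement is the Claim_ definition above) =====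
theorem check_access_control_spec : Claim_equal_check_access_control := by
  intro cfg _
  unfold Spec_check_access_control
  simp only [check_access_control, check_access_control_alt]
  generalize (PySem.Str.split? (PySem.Str.lower cfg) "\n").getD [] = lines
  have hfoldA : lines.foldl (fun (st : Bool × Bool × Bool) line =>
      let l := PySem.Str.strip line
      if PySem.Str.startswith l "line vty" then
        (st.1, true, st.2.2)
      else
        let in_vty := if st.2.1 && PySem.Str.startswith l "line " then false else st.2.1
        if in_vty then
          (st.1 || (PySem.Str.isIn "transport input ssh" l && !(PySem.Str.isIn "telnet" l)),
           in_vty,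
           st.2.2 || PySem.Str.isIn "transport input telnet" l)
        else (st.1, in_vty, st.2.2)) (false, false, false)
      = (lines.map PySem.Str.strip).foldl pvStepA (false, false, false) := by
    rw [List.foldl_map]
    rfl
  have hfoldB : (lines.map PySem.Str.strip).foldl (fun (secs : List (String × List String)) l =>
      if PySem.Str.startswith l "line " then secs ++ [(l, [])]
      else if secs.isEmpty then secs
      else pvAppendLast secs l) []
      = (lines.map PySem.Str.strip).foldl pvStepB [] := rfl
  have hA := foldA_eq (lines.map PySem.Str.strip) false false false
  have hB := foldB_eq (lines.map PySem.Str.strip) []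
  have hB0 : pvVtyBody ([] : List (String × List String)) = [] := by
    simp [pvVtyBody]
  have hL0 : pvLastVty ([] : List (String × List String)) = false := by
    simp [pvLastVty]
  rw [hB0, hL0, List.nil_append] at hB
  have hvty : List.flatMap (fun (s : String × List String) => s.2)
      (List.filter (fun s => PySem.Str.startswith s.1 "line vty")
        (List.foldl pvStepB [] (lines.map PySem.Str.strip)))
      = pvBody (lines.map PySem.Str.strip) false := hB
  rw [hfoldA, hfoldB, hA, hvty]
  have henable : (lines.map PySem.Str.strip).any (fun l => PySem.Str.startswith l "enable secret")
      = lines.any (fun line => PySem.Str.startswith (PySem.Str.strip line) "enable secret") :=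
    List.any_map ..
  rw [henable]
  have hP : pvP = fun b => PySem.Chars.isIn "transport input ssh".toList b.toList &&
      !PySem.Chars.isIn "telnet".toList b.toList := by
    funext b; simp [pvP]
  have hQ : pvQ = fun b => PySem.Chars.isIn "transport input telnet".toList b.toList := by
    funext b; simp [pvQ]
  norm_num [hP, hQ]
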